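-- pv_equiv track=rewrite | github.com/Nauzeous/project-euler | project euler/n86.py | ppt
-- ===== SOURCE A (Python) =====
-- import time, math
--
-- def combinations(a, bc):
--     if 2*a < bc:
--         return 0
--     elif a >= bc:
--         return (bc//2)
--     else:
--         if bc % 2 == 0:
--             return a + 1 - ((bc)//2)
--         else:
--             return a - ((bc-1)//2)
--
-- def ppt(N): #Pythagorean Triplet generator
--     limit = 10**4
--     triples = [0]*(limit + 1)
--     for m in range(1,int(math.sqrt(2*limit))+1):
--         for n in range(1,m):
--             if (m+n) % 2 == 1 and math.gcd(m,n) == 1: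
--                 #a = m**2 + n**2 #not needed for this problem
--                 b = m**2 - n**2
--                 c = 2*m*n
--                 #Case 1
--                 for k in range(1, int(limit/b) + 1):
--                     triples[k*b] += combinations(k*b, k*c)
--
--                 #Case 2
--                 for k in range(1, int(limit/c) + 1):
--                     triples[k*c] += combinations(k*c, k*b)
--
--     #return sum(triples[:101])
--
--     total = 0
--     for x in range(len(triples)):
--         total += triples[x]
--         if total > N:
--             return x
-- ===== SOURCE B (Python) =====
-- import math
--
-- def combinations(a, bc):
--     if 2*a < bc:
--         return 0
--     elif a >= bc:
--         return (bc//2)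
--     else:
--         if bc % 2 == 0:
--             return a + 1 - ((bc)//2)
--         else:
--             return a - ((bc-1)//2)
--
-- def _scatter(triples, m, n, limit):
--     # credit the two legs of every multiple of the primitive triple from (m, n)
--     b = m*m - n*n
--     c = 2*m*n
--     for k in range(1, limit//b + 1):
--         triples[k*b] += combinations(k*b, k*c)
--     for k in range(1, limit//c + 1):
--         triples[k*c] += combinations(k*c, k*b)
--
-- def _gen(m, n, mmax, triples, limit):
--     # Barning-Hall ternary tree: every coprime pair m > n >= 1 of opposite
--     # parity is reached exactly once from the root (2, 1); m grows strictly
--     # down every branch, so pruning at m > mmax is exhaustive.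
--     if m > mmax:
--         return
--     _scatter(triples, m, n, limit)
--     _gen(2*m - n, m, mmax, triples, limit)
--     _gen(2*m + n, m, mmax, triples, limit)
--     _gen(m + 2*n, n, mmax, triples, limit)
--
-- def ppt(N):
--     limit = 10**4
--     triples = [0]*(limit + 1)
--     _gen(2, 1, int(math.isqrt(2*limit)), triples, limit)
--     total = 0
--     for x in range(len(triples)):
--         total += triples[x]
--         if total > N:
--             return x
-- ===== Notes on version B (the rewrite author's own statement) =====
-- stated objective: alternative
-- what changed: A discovers the primitive-triple parameters (m,n) by scanning all pairs and filtering with gcd and parity tests; B generates exactly those coprime opposite-parity pairs by walking the Barning-Hall ternary tree from (2,1) with no gcd computation, keeping the same per-pair multiple-scatter and final cumulative scan.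
-- outside the precondition, e.g. on ppt(36553025): A returns None, B returns None
import Mathlib
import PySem

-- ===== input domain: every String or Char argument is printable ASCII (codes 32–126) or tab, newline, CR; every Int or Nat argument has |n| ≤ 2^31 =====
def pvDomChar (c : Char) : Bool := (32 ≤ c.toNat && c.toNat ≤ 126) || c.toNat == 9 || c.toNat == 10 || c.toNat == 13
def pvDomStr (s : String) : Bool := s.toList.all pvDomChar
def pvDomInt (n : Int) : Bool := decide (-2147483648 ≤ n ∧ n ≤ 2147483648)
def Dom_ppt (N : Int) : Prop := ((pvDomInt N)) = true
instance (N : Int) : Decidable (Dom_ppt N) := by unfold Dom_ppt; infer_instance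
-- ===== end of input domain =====

-- B replaces A's double loop with gcd/parity filtering by a Barning–Hall ternary-tree
-- walk over the same coprime (m, n) pairs (objective: alternative algorithm).

-- ===== PORT A =====
-- helper `combinations` (same def in both Python files)
def combinationsP (a bc : Int) : Int :=
  if 2*a < bc then 0
  else if a ≥ bc then PySem.Int.floordiv bc 2
  else if PySem.Int.mod bc 2 = 0 then a + 1 - PySem.Int.floordiv bc 2
  else a - PySem.Int.floordiv (bc - 1) 2

-- the final cumulative-total loop (same text in both Python files); the 0 after the
-- loop is Python's implicit None, excluded by Pre_ppt
def scanGo (N : Int) (tr : List Int) : List Int → Int → Int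
  | [], _ => 0
  | x :: xs, total =>
      let total := total + PySem.List.pyGetD tr x 0
      if total > N then x else scanGo N tr xs total

def pptScan (N : Int) (tr : List Int) : Int :=
  scanGo N tr (PySem.List.pyRange 0 (PySem.List.len tr) 1) 0

-- int(math.sqrt(2*limit)) is ported as Nat.sqrt 20000 = 141 (the float sqrt of 20000 is
-- 141.42…, far from an integer, so truncation is exact); int(limit/b) is ported as
-- floordiv (exact: the float quotient ≤ 10^4 carries an error ≪ 1/b)
def ppt (N : Int) : Int :=
  let limit : Int := 10^4
  let triples : List Int := List.replicate (limit + 1).toNat 0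
  let triples := (PySem.List.pyRange 1 ((Nat.sqrt (2*10^4) : Int) + 1) 1).foldl (fun tr m =>
    (PySem.List.pyRange 1 m 1).foldl (fun tr n =>
      if PySem.Int.mod (m + n) 2 = 1 ∧ Int.gcd m n = 1 then
        let b := m^2 - n^2
        let c := 2*m*n
        let tr := (PySem.List.pyRange 1 (PySem.Int.floordiv limit b + 1) 1).foldl
          (fun tr k => PySem.List.pySetD tr (k*b)
            (PySem.List.pyGetD tr (k*b) 0 + combinationsP (k*b) (k*c))) tr
        (PySem.List.pyRange 1 (PySem.Int.floordiv limit c + 1) 1).foldl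
          (fun tr k => PySem.List.pySetD tr (k*c)
            (PySem.List.pyGetD tr (k*c) 0 + combinationsP (k*c) (k*b))) tr
      else tr) tr) triples
  pptScan N triples

-- ===== PORT B =====
def scatterP (tr : List Int) (m n limit : Int) : List Int :=
  let b := m*m - n*n
  let c := 2*m*n
  let tr := (PySem.List.pyRange 1 (PySem.Int.floordiv limit b + 1) 1).foldl
    (fun tr k => PySem.List.pySetD tr (k*b)
      (PySem.List.pyGetD tr (k*b) 0 + combinationsP (k*b) (k*c))) tr
  (PySem.List.pyRange 1 (PySem.Int.floordiv limit c + 1) 1).foldl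
    (fun tr k => PySem.List.pySetD tr (k*c)
      (PySem.List.pyGetD tr (k*c) 0 + combinationsP (k*c) (k*b))) tr

-- fuel only makes the recursion structural: m rises by ≥ 1 per level starting at 2, so
-- 150 levels exhaust the tree below mmax = 141
def genP : Nat → Int → Int → Int → Int → List Int → List Int
  | 0, _, _, _, _, tr => tr
  | fuel+1, m, n, mmax, limit, tr =>
    if m > mmax then tr else
      genP fuel (m + 2*n) n mmax limit
        (genP fuel (2*m + n) m mmax limit
          (genP fuel (2*m - n) m mmax limit (scatterP tr m n limit)))

def ppt_alt (N : Int) : Int :=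
  let limit : Int := 10^4
  let triples : List Int := List.replicate (limit + 1).toNat 0
  pptScan N (genP 150 2 1 (Nat.sqrt (2*10^4) : Int) limit triples)

-- ===== PRECONDITION & SPEC =====
-- Pre_ excludes N ≥ 36553025 (the grand total of all counts), where A's final loop
-- falls through and Python returns None, which is not an int.
def Pre_ppt (N : Int) : Prop := N < 36553025
instance (N : Int) : Decidable (Pre_ppt N) := by unfold Pre_ppt; infer_instance
def pvWitness_ppt : Int := 1000000
def Spec_ppt (N : Int) (out : Int) : Prop := out = ppt_alt N
instance (N : Int) (out : Int) : Decidable (Spec_ppt N out) := by unfold Spec_ppt; infer_instance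

-- ===== CLAIM (what is proved, stated in full; the proofs are below) =====
def Claim_equal_ppt : Prop := ∀ (N : Int), Dom_ppt N → Pre_ppt N → Spec_ppt N (ppt N)

-- ===== LEMMAS AND PROOFS =====

theorem sqrt20000 : ((Nat.sqrt (2*10^4) : Nat) : Int) = 141 := by
  have h : Nat.sqrt 20000 = 141 :=
    le_antisymm (by rw [← Nat.lt_succ_iff, Nat.sqrt_lt]; norm_num)
      (Nat.le_sqrt.mpr (by norm_num))
  show ((Nat.sqrt 20000 : Nat) : Int) = 141
  rw [h]
  rfl

-- the pair list A's filtered double loop ranges over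
def pairsA : List (Int × Int) :=
  (PySem.List.pyRange 1 142 1).flatMap (fun m =>
    ((PySem.List.pyRange 1 m 1).filter
      (fun n => decide (PySem.Int.mod (m + n) 2 = 1 ∧ Int.gcd m n = 1))).map (fun n => (m, n)))

-- the pair list B's tree walk visits
def genPairs : Nat → Int → Int → Int → List (Int × Int)
  | 0, _, _, _ => []
  | fuel+1, m, n, mmax =>
    if m > mmax then [] else
      (m, n) :: (genPairs fuel (2*m - n) m mmax ++
                 genPairs fuel (2*m + n) m mmax ++
                 genPairs fuel (m + 2*n) n mmax)

def validPair (m n : Int) : Prop :=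
  1 ≤ n ∧ n < m ∧ m ≤ 141 ∧ (m + n) % 2 = 1 ∧ Int.gcd m n = 1

theorem mem_pairsA_iff (p : Int × Int) : p ∈ pairsA ↔ validPair p.1 p.2 := by
  obtain ⟨m, n⟩ := p
  simp only [pairsA, List.mem_flatMap, List.mem_map, List.mem_filter,
    PySem.List.mem_pyRange_one, validPair, decide_eq_true_eq, Prod.mk.injEq]
  constructor
  · rintro ⟨a, ⟨h1, h2⟩, b, ⟨⟨h3, h4⟩, h5, h6⟩, h7, h8⟩
    subst h7; subst h8
    rw [PySem.Int.mod_eq_emod_of_pos (by norm_num)] at h5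
    exact ⟨h3, h4, by omega, h5, h6⟩
  · rintro ⟨h1, h2, h3, h4, h5⟩
    exact ⟨m, ⟨by omega, by omega⟩, n, ⟨⟨h1, h2⟩,
      by rw [PySem.Int.mod_eq_emod_of_pos (by norm_num)]; exact h4, h5⟩, rfl, rfl⟩

theorem nodup_pyRange (a b : Int) : (PySem.List.pyRange a b).Nodup := by
  have key : ∀ (k : Nat) (a b : Int), (b - a).toNat ≤ k → (PySem.List.pyRange a b).Nodup := by
    intro k
    induction k with
    | zero =>
      intro a b hk
      rw [PySem.List.pyRange_one_eq_nil (by omega)]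
      exact List.nodup_nil
    | succ k ih =>
      intro a b hk
      by_cases hab : a < b
      · rw [PySem.List.pyRange_one_cons hab]
        refine List.Nodup.cons ?_ (ih (a+1) b (by omega))
        intro hmem
        have := (PySem.List.mem_pyRange_one).mp hmem
        omega
      · rw [PySem.List.pyRange_one_eq_nil (by omega)]
        exact List.nodup_nil
  exact key (b - a).toNat a b le_rfl

theorem nodup_pairsA : pairsA.Nodup := by
  rw [pairsA, List.nodup_flatMap]
  refine ⟨fun m _ => ?_, ?_⟩
  · exact ((nodup_pyRange 1 m).filter _).map (fun a b h => by simpa using h)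
  · refine List.Pairwise.imp ?_ (nodup_pyRange 1 142)
    intro a b hab
    rw [Function.onFun, List.disjoint_left]
    rintro ⟨x, y⟩ hxa hxb
    simp only [List.mem_map, List.mem_filter, Prod.mk.injEq] at hxa hxb
    obtain ⟨n1, _, h1, _⟩ := hxa
    obtain ⟨n2, _, h2, _⟩ := hxb
    exact hab (h1.trans h2.symm)

-- scatter as a fold of single add-at-index updates
def addAt (tr : List Int) (i v : Int) : List Int :=
  PySem.List.pySetD tr i (PySem.List.pyGetD tr i 0 + v)

def updates (m n limit : Int) : List (Int × Int) :=
  ((PySem.List.pyRange 1 (PySem.Int.floordiv limit (m*m - n*n) + 1) 1).map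
    (fun k => (k*(m*m - n*n), combinationsP (k*(m*m - n*n)) (k*(2*m*n))))) ++
  ((PySem.List.pyRange 1 (PySem.Int.floordiv limit (2*m*n) + 1) 1).map
    (fun k => (k*(2*m*n), combinationsP (k*(2*m*n)) (k*(m*m - n*n)))))

theorem scatterP_eq_foldl (tr : List Int) (m n limit : Int) :
    scatterP tr m n limit = (updates m n limit).foldl (fun t iv => addAt t iv.1 iv.2) tr := by
  simp [scatterP, updates, List.foldl_append, List.foldl_map, addAt]

theorem updates_nonneg (m n limit : Int) (h1 : 1 ≤ n) (h2 : n < m) :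
    ∀ q ∈ updates m n limit, 0 ≤ q.1 := by
  rintro ⟨i, v⟩ hq
  simp only [updates, List.mem_append, List.mem_map, PySem.List.mem_pyRange_one,
    Prod.mk.injEq] at hq
  have hb : 0 < m*m - n*n := by nlinarith
  have hc : 0 < 2*m*n := by nlinarith
  rcases hq with ⟨k, ⟨hk, _⟩, hi, _⟩ | ⟨k, ⟨hk, _⟩, hi, _⟩ <;> simp only [← hi] <;> positivity

theorem setAdd_comm (t : List Int) (a b : Nat) (v w : Int) :
    (t.set a (t.getD a 0 + v)).set b ((t.set a (t.getD a 0 + v)).getD b 0 + w)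
      = (t.set b (t.getD b 0 + w)).set a ((t.set b (t.getD b 0 + w)).getD a 0 + v) := by
  simp only [List.getD_eq_getElem?_getD]
  by_cases hab : a = b
  · subst hab
    by_cases hlen : a < t.length
    · rw [List.getElem?_set_self hlen, List.getElem?_set_self hlen, List.set_set, List.set_set]
      simp only [Option.getD_some]
      ring_nf
    · simp [List.set_eq_of_length_le (show t.length ≤ a by omega)]
  · rw [List.getElem?_set_ne hab, List.getElem?_set_ne (Ne.symm hab),
      List.set_comm _ _ hab]

theorem addAt_comm (t : List Int) (i j v w : Int) (hi : 0 ≤ i) (hj : 0 ≤ j) :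
    addAt (addAt t i v) j w = addAt (addAt t j w) i v := by
  simp only [addAt, PySem.List.pySetD_of_nonneg _ _ hi, PySem.List.pySetD_of_nonneg _ _ hj,
    PySem.List.pyGetD_of_nonneg _ _ hi, PySem.List.pyGetD_of_nonneg _ _ hj]
  exact setAdd_comm t i.toNat j.toNat v w

theorem foldl_addAt_single_comm (U : List (Int × Int)) (t : List Int) (p : Int × Int)
    (hU : ∀ q ∈ U, 0 ≤ q.1) (hp : 0 ≤ p.1) :
    U.foldl (fun t iv => addAt t iv.1 iv.2) (addAt t p.1 p.2)
      = addAt (U.foldl (fun t iv => addAt t iv.1 iv.2) t) p.1 p.2 := by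
  induction U generalizing t with
  | nil => rfl
  | cons q U ih =>
    simp only [List.foldl_cons]
    rw [← addAt_comm t q.1 p.1 q.2 p.2 (hU q (by simp)) hp]
    exact ih _ (fun r hr => hU r (by simp [hr]))

theorem foldl_addAt_swap (U1 U2 : List (Int × Int)) (t : List Int)
    (h1 : ∀ q ∈ U1, 0 ≤ q.1) (h2 : ∀ q ∈ U2, 0 ≤ q.1) :
    U2.foldl (fun t iv => addAt t iv.1 iv.2) (U1.foldl (fun t iv => addAt t iv.1 iv.2) t)
      = U1.foldl (fun t iv => addAt t iv.1 iv.2) (U2.foldl (fun t iv => addAt t iv.1 iv.2) t) := by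
  induction U1 generalizing t with
  | nil => rfl
  | cons p U1 ih =>
    simp only [List.foldl_cons]
    rw [ih _ (fun r hr => h1 r (by simp [hr])),
      foldl_addAt_single_comm U2 t p h2 (h1 p (by simp))]

theorem scatter_comm (t : List Int) (p q : Int × Int)
    (hp : 1 ≤ p.2 ∧ p.2 < p.1) (hq : 1 ≤ q.2 ∧ q.2 < q.1) :
    scatterP (scatterP t p.1 p.2 (10^4)) q.1 q.2 (10^4)
      = scatterP (scatterP t q.1 q.2 (10^4)) p.1 p.2 (10^4) := by
  simp only [scatterP_eq_foldl]
  exact foldl_addAt_swap _ _ t (updates_nonneg _ _ _ hp.1 hp.2) (updates_nonneg _ _ _ hq.1 hq.2)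

-- genP as a fold over genPairs
theorem genP_eq (fuel : Nat) : ∀ (m n mmax limit : Int) (tr : List Int),
    genP fuel m n mmax limit tr
      = (genPairs fuel m n mmax).foldl (fun t p => scatterP t p.1 p.2 limit) tr := by
  induction fuel with
  | zero => intro m n mmax limit tr; rfl
  | succ fuel ih =>
    intro m n mmax limit tr
    simp only [genP, genPairs]
    split
    · rfl
    · simp [List.foldl_append, ih]

-- a nested loop is a fold over the flattened pair list
theorem foldl_nested {α β γ : Type} (l : List α) (g : α → List β) (f : γ → α → β → γ)
    (init : γ) :
    l.foldl (fun t m => (g m).foldl (fun t n => f t m n) t) init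
      = (l.flatMap fun m => (g m).map (fun n => (m, n))).foldl (fun t p => f t p.1 p.2) init := by
  induction l generalizing init with
  | nil => rfl
  | cons m l ih => simp [List.foldl_append, List.foldl_map, ih]

-- fuel monotonicity and the child-membership lemma for genPairs
theorem genPairs_mono (fuel : Nat) : ∀ (m n mmax : Int),
    genPairs fuel m n mmax ⊆ genPairs (fuel+1) m n mmax := by
  induction fuel with
  | zero => intro m n mmax; simp [genPairs]
  | succ fuel ih =>
    intro m n mmax p hp
    rw [genPairs] at hp ⊢
    split at hp
    · exact absurd hp (List.not_mem_nil)
    · rw [if_neg (by assumption)]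
      rcases List.mem_cons.mp hp with h | h
      · exact List.mem_cons.mpr (Or.inl h)
      · refine List.mem_cons.mpr (Or.inr ?_)
        simp only [List.mem_append] at h ⊢
        rcases h with (h | h) | h
        · exact Or.inl (Or.inl (ih _ _ _ h))
        · exact Or.inl (Or.inr (ih _ _ _ h))
        · exact Or.inr (ih _ _ _ h)

theorem genPairs_mono_le {fuel fuel' : Nat} (h : fuel ≤ fuel') (m n mmax : Int) :
    genPairs fuel m n mmax ⊆ genPairs fuel' m n mmax := by
  induction h with
  | refl => exact fun _ h => h
  | step _ ih => exact fun p hp => genPairs_mono _ _ _ _ (ih hp)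

theorem genPairs_child (fuel : Nat) : ∀ (m0 n0 mmax p q x y : Int),
    (p, q) ∈ genPairs fuel m0 n0 mmax →
    ((x, y) = (2*p - q, p) ∨ (x, y) = (2*p + q, p) ∨ (x, y) = (p + 2*q, q)) →
    x ≤ mmax →
    (x, y) ∈ genPairs (fuel+1) m0 n0 mmax := by
  induction fuel with
  | zero => intro m0 n0 mmax p q x y hp; exact absurd hp (List.not_mem_nil)
  | succ fuel ih =>
    intro m0 n0 mmax p q x y hp hchild hx
    rw [genPairs] at hp
    split at hp
    · exact absurd hp (List.not_mem_nil)
    · rw [genPairs, if_neg (by assumption)]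
      rcases List.mem_cons.mp hp with h | h
      · -- (p,q) is the root: (x,y) is the root of one of the subtrees
        obtain ⟨rfl, rfl⟩ := Prod.mk.injEq .. ▸ (by exact Prod.mk.inj h : p = m0 ∧ q = n0)
        have hroot : ∀ (u v : Int), (x, y) = (u, v) →
            (x, y) ∈ genPairs (fuel+1) u v mmax := by
          rintro u v ⟨rfl, rfl⟩
          rw [genPairs, if_neg (by omega)]
          exact List.mem_cons_self
        refine List.mem_cons.mpr (Or.inr ?_)
        simp only [List.mem_append]
        rcases hchild with h' | h' | h'
        · exact Or.inl (Or.inl (hroot _ _ h'))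
        · exact Or.inl (Or.inr (hroot _ _ h'))
        · exact Or.inr (hroot _ _ h')
      · refine List.mem_cons.mpr (Or.inr ?_)
        simp only [List.mem_append] at h ⊢
        rcases h with (h | h) | h
        · exact Or.inl (Or.inl (ih _ _ _ _ _ _ _ h hchild hx))
        · exact Or.inl (Or.inr (ih _ _ _ _ _ _ _ h hchild hx))
        · exact Or.inr (ih _ _ _ _ _ _ _ h hchild hx)

-- descent: every valid pair other than (2,1) is a child of a smaller valid pair
theorem parent_exists (m n : Int) (hv : validPair m n) (hne : ¬(m = 2 ∧ n = 1)) :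
    ∃ p q, validPair p q ∧ p < m ∧
      ((m, n) = (2*p - q, p) ∨ (m, n) = (2*p + q, p) ∨ (m, n) = (p + 2*q, q)) := by
  obtain ⟨h1, h2, h3, h4, h5⟩ := hv
  have hgcd_nm : Int.gcd n m = 1 := by rwa [Int.gcd_comm]
  rcases lt_trichotomy m (2*n) with hlt | heq | hgt
  · refine ⟨n, 2*n - m, ⟨by omega, by omega, by omega, by omega, ?_⟩, by omega,
      Or.inl (by rw [Prod.mk.injEq]; omega)⟩
    have : Int.gcd n (2*n - m) = Int.gcd n (-m) := by
      have := Int.gcd_add_mul_left_right n (-m) 2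
      rw [← this]; congr 1; ring
    rw [this]
    simpa [Int.gcd, Int.natAbs_neg] using hgcd_nm
  · -- m = 2n forces n = 1, m = 2 (gcd) — excluded by hne
    exfalso
    have hg : Int.gcd m n = n.natAbs := by
      rw [heq, Int.gcd_comm]
      calc Int.gcd n (2*n) = Int.gcd n (0 + n*2) := by congr 1; ring
        _ = Int.gcd n 0 := Int.gcd_add_mul_left_right n 0 2
        _ = n.natAbs := Int.gcd_zero_right n
    omega
  · rcases lt_trichotomy m (3*n) with hlt3 | heq3 | hgt3
    · -- 2n < m < 3n: parent (n, m - 2n)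
      refine ⟨n, m - 2*n, ⟨by omega, by omega, by omega, by omega, ?_⟩, by omega,
        Or.inr (Or.inl (by rw [Prod.mk.injEq]; omega))⟩
      calc Int.gcd n (m - 2*n) = Int.gcd n (m + n * (-2)) := by congr 1; ring
        _ = Int.gcd n m := Int.gcd_add_mul_left_right n m (-2)
        _ = 1 := hgcd_nm
    · -- m = 3n: gcd forces n = 1, but then m + n = 4 is even, contradicting parity
      exfalso
      have hg : Int.gcd m n = n.natAbs := by
        rw [heq3, Int.gcd_comm]
        calc Int.gcd n (3*n) = Int.gcd n (0 + n*3) := by congr 1; ring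
          _ = Int.gcd n 0 := Int.gcd_add_mul_left_right n 0 3
          _ = n.natAbs := Int.gcd_zero_right n
      omega
    · -- m > 3n: parent (m - 2n, n)
      refine ⟨m - 2*n, n, ⟨by omega, by omega, by omega, by omega, ?_⟩, by omega,
        Or.inr (Or.inr (by rw [Prod.mk.injEq]; omega))⟩
      rw [Int.gcd_comm]
      calc Int.gcd n (m - 2*n) = Int.gcd n (m + n * (-2)) := by congr 1; ring
        _ = Int.gcd n m := Int.gcd_add_mul_left_right n m (-2)
        _ = 1 := hgcd_nm

-- completeness of the pruned tree
theorem valid_mem_gen : ∀ (k : Nat) (m n : Int), m.toNat ≤ k → validPair m n →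
    (m, n) ∈ genPairs (k+1) 2 1 141 := by
  intro k
  induction k with
  | zero =>
    intro m n hk hv
    exfalso; obtain ⟨h1, h2, _⟩ := hv; omega
  | succ k ih =>
    intro m n hk hv
    by_cases hsm : m.toNat ≤ k
    · exact genPairs_mono _ _ _ _ (ih m n hsm hv)
    · by_cases hbase : m = 2 ∧ n = 1
      · obtain ⟨rfl, rfl⟩ := hbase
        rw [genPairs, if_neg (by omega)]
        exact List.mem_cons_self
      · obtain ⟨p, q, hpv, hplt, hchild⟩ := parent_exists m n hv hbase
        have hp2 : (2:Int) ≤ p := by obtain ⟨a, b, _⟩ := hpv; omega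
        have hppar : (p, q) ∈ genPairs (k+1) 2 1 141 := by
          refine ih p q ?_ hpv
          omega
        have hm141 : m ≤ 141 := by obtain ⟨_, _, h, _⟩ := hv; omega
        exact genPairs_child (k+1) 2 1 141 p q m n hppar hchild hm141

theorem pairsA_subset : pairsA ⊆ genPairs 150 2 1 141 := by
  intro p hp
  have hv := (mem_pairsA_iff p).mp hp
  obtain ⟨m, n⟩ := p
  have h141 : m.toNat ≤ 141 := by obtain ⟨_, h2, h3, _⟩ := hv; omega
  exact genPairs_mono_le (by omega) _ _ _ (valid_mem_gen 141 m n h141 hv)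

set_option maxRecDepth 100000 in
theorem lengths_eq : (genPairs 150 2 1 141).length = pairsA.length := by decide

theorem perm_pairs : pairsA.Perm (genPairs 150 2 1 141) :=
  (List.subperm_of_subset nodup_pairsA pairsA_subset).perm_of_length_le (le_of_eq lengths_eq)

theorem arrays_eq (init : List Int) :
    pairsA.foldl (fun t p => scatterP t p.1 p.2 (10^4)) init
      = (genPairs 150 2 1 141).foldl (fun t p => scatterP t p.1 p.2 (10^4)) init := by
  refine List.Perm.foldl_eq' perm_pairs ?_ init
  intro x hx y hy z
  have hxv := (mem_pairsA_iff x).mp hx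
  have hyv := (mem_pairsA_iff y).mp hy
  exact scatter_comm z x y ⟨hxv.1, hxv.2.1⟩ ⟨hyv.1, hyv.2.1⟩

theorem arrA_eq :
    (PySem.List.pyRange 1 (141 + 1) 1).foldl (fun tr m =>
      (PySem.List.pyRange 1 m 1).foldl (fun tr n =>
        if PySem.Int.mod (m + n) 2 = 1 ∧ Int.gcd m n = 1 then
          let b := m^2 - n^2
          let c := 2*m*n
          let tr := (PySem.List.pyRange 1 (PySem.Int.floordiv (10^4) b + 1) 1).foldl
            (fun tr k => PySem.List.pySetD tr (k*b)
              (PySem.List.pyGetD tr (k*b) 0 + combinationsP (k*b) (k*c))) tr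
          (PySem.List.pyRange 1 (PySem.Int.floordiv (10^4) c + 1) 1).foldl
            (fun tr k => PySem.List.pySetD tr (k*c)
              (PySem.List.pyGetD tr (k*c) 0 + combinationsP (k*c) (k*b))) tr
        else tr) tr) (List.replicate ((10^4 : Int) + 1).toNat 0)
      = pairsA.foldl (fun t p => scatterP t p.1 p.2 (10^4))
          (List.replicate ((10^4 : Int) + 1).toNat 0) := by
  have hbody : (fun (tr : List Int) (m : Int) =>
      (PySem.List.pyRange 1 m 1).foldl (fun tr n =>
        if PySem.Int.mod (m + n) 2 = 1 ∧ Int.gcd m n = 1 then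
          let b := m^2 - n^2
          let c := 2*m*n
          let tr := (PySem.List.pyRange 1 (PySem.Int.floordiv (10^4) b + 1) 1).foldl
            (fun tr k => PySem.List.pySetD tr (k*b)
              (PySem.List.pyGetD tr (k*b) 0 + combinationsP (k*b) (k*c))) tr
          (PySem.List.pyRange 1 (PySem.Int.floordiv (10^4) c + 1) 1).foldl
            (fun tr k => PySem.List.pySetD tr (k*c)
              (PySem.List.pyGetD tr (k*c) 0 + combinationsP (k*c) (k*b))) tr
        else tr) tr)
      = (fun (tr : List Int) (m : Int) =>
        ((PySem.List.pyRange 1 m 1).filter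
          (fun n => decide (PySem.Int.mod (m + n) 2 = 1 ∧ Int.gcd m n = 1))).foldl
          (fun tr n => scatterP tr m n (10^4)) tr) := by
    funext tr m
    rw [← PySem.List.foldl_ite_eq_foldl_filter]
    congr 1
    funext tr n
    by_cases hc : PySem.Int.mod (m + n) 2 = 1 ∧ Int.gcd m n = 1
    · simp only [if_pos hc, scatterP, pow_two]
    · simp only [if_neg hc]
  rw [hbody]
  rw [foldl_nested (PySem.List.pyRange 1 (141 + 1) 1)
    (fun m => (PySem.List.pyRange 1 m 1).filter
      (fun n => decide (PySem.Int.mod (m + n) 2 = 1 ∧ Int.gcd m n = 1)))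
    (fun tr m n => scatterP tr m n (10^4))]
  rfl

theorem ppt_eq_fold (N : Int) :
    ppt N = pptScan N (pairsA.foldl (fun t p => scatterP t p.1 p.2 (10^4))
      (List.replicate ((10^4 : Int) + 1).toNat 0)) := by
  unfold ppt
  rw [sqrt20000]
  exact congrArg (pptScan N) arrA_eq

theorem ppt_alt_eq_fold (N : Int) :
    ppt_alt N = pptScan N ((genPairs 150 2 1 141).foldl (fun t p => scatterP t p.1 p.2 (10^4))
      (List.replicate ((10^4 : Int) + 1).toNat 0)) := by
  unfold ppt_alt
  rw [sqrt20000]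
  exact congrArg (pptScan N) (genP_eq 150 2 1 141 (10^4) _)

-- ===== VERDICT (by name: the statement is the Claim_ definition above) =====
theorem ppt_spec : Claim_equal_ppt := by
  unfold Claim_equal_ppt
  intro N _ _
  unfold Spec_ppt
  rw [ppt_eq_fold, ppt_alt_eq_fold, arrays_eq]
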